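-- pv_equiv track=rewrite | github.com/ImperialCollegeLondon/IM-MAG-Data-Processing-Tools | src/science_decoder.py | _unpack_value
-- ===== SOURCE A (Python) =====
-- def _unpack_value(buffer, bit_cursor, bit_count):
--     value = 0
--     while bit_count:
--         buffer_index = bit_cursor // 8
--         bits_unread = 8 - (bit_cursor % 8)
--         bit_shift = bit_count - bits_unread
--         if bit_shift >= 0:
--             read_mask = (1 << bits_unread) - 1
--             value += (buffer[buffer_index] & read_mask) << bit_shift
--             bit_cursor += bits_unread
--             bit_count = bit_shift
--         else:
--             read_mask = ((1 << bits_unread) - 1) & (0xFF << -bit_shift)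
--             value += (buffer[buffer_index] & read_mask) >> -bit_shift
--             bit_cursor += bit_count
--             bit_count = 0
--     return (value, bit_cursor)
-- ===== SOURCE B (Python) =====
-- def _unpack_value(buffer, bit_cursor, bit_count):
--     start = bit_cursor // 8
--     end = (bit_cursor + bit_count + 7) // 8
--     chunk = 0
--     for i in range(start, end):
--         chunk = (chunk << 8) | (buffer[i] & 0xFF)
--     trailing = (end - start) * 8 - (bit_cursor % 8 + bit_count)
--     value = (chunk >> trailing) & ((1 << bit_count) - 1)
--     return (value, bit_cursor + bit_count)
-- ===== Notes on version B (the rewrite author's own statement) =====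
-- stated objective: simpler
-- what changed: A's per-byte while-loop with cursor/count mutation and two mask branches is replaced by folding the covered byte span into one integer chunk and extracting the field with a single shift-and-mask; Pre_ excludes negative bit_count and bit_count=0 with a non-byte-aligned cursor outside the buffer's bit range, where A returns without reading the buffer but B's byte-span read raises.
-- outside the precondition, e.g. on _unpack_value([255], 0, -1): A returns (0, -1), B raises ValueError; on _unpack_value([], 3, 0): A returns (0, 3), B raises IndexError
import Mathlib
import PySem

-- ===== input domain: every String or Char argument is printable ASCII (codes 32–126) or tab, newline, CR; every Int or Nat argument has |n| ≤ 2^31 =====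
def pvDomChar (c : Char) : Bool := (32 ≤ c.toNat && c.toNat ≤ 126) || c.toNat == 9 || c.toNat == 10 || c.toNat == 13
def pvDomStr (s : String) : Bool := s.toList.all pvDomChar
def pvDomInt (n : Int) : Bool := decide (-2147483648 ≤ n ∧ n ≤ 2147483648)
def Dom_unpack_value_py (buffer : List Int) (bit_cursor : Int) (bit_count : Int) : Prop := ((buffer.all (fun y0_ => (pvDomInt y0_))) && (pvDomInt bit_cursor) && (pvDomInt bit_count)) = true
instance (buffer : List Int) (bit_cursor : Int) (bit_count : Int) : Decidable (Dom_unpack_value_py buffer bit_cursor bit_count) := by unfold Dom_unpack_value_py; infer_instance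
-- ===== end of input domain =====

-- B replaces A's per-byte while-loop by one pass folding the covered byte span into a single
-- integer `chunk`, then extracts the field with one shift-and-mask (objective: simpler).

-- ===== PORT A =====
-- literal transliteration of A's while-loop (state: value, bit_cursor, bit_count)
def unpackLoopA (buffer : List Int) (value bit_cursor bit_count : Int) : Int × Int :=
  if _h : bit_count = 0 then (value, bit_cursor)
  else
    let buffer_index := PySem.Int.floordiv bit_cursor 8
    let bits_unread := 8 - PySem.Int.mod bit_cursor 8
    let bit_shift := bit_count - bits_unread
    if _hs : 0 ≤ bit_shift then
      let read_mask := (1 <<< bits_unread.toNat) - 1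
      unpackLoopA buffer
        (value + (PySem.Int.band (PySem.List.pyGetD buffer buffer_index 0) read_mask) <<< bit_shift.toNat)
        (bit_cursor + bits_unread) bit_shift
    else
      let read_mask := PySem.Int.band ((1 <<< bits_unread.toNat) - 1) (0xFF <<< (-bit_shift).toNat)
      unpackLoopA buffer
        (value + (PySem.Int.band (PySem.List.pyGetD buffer buffer_index 0) read_mask) >>> (-bit_shift).toNat)
        (bit_cursor + bit_count) 0
termination_by bit_count.natAbs
decreasing_by
  · have h1 := PySem.Int.mod_nonneg bit_cursor (b := 8) (by omega)
    have h2 := PySem.Int.mod_lt bit_cursor (b := 8) (by omega)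
    simp only [bit_shift, bits_unread] at *
    omega
  · omega

def unpack_value_py (buffer : List Int) (bit_cursor : Int) (bit_count : Int) : Int × Int :=
  unpackLoopA buffer 0 bit_cursor bit_count

-- ===== PORT B =====
def unpack_value_py_alt (buffer : List Int) (bit_cursor : Int) (bit_count : Int) : Int × Int :=
  let start := PySem.Int.floordiv bit_cursor 8
  let stop := PySem.Int.floordiv (bit_cursor + bit_count + 7) 8
  let chunk := (PySem.List.pyRange start stop 1).foldl
      (fun acc i => PySem.Int.bor (acc <<< 8) (PySem.Int.band (PySem.List.pyGetD buffer i 0) 0xFF)) 0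
  let trailing := (stop - start) * 8 - (PySem.Int.mod bit_cursor 8 + bit_count)
  let value := PySem.Int.band (chunk >>> trailing.toNat) ((1 <<< bit_count.toNat) - 1)
  (value, bit_cursor + bit_count)

-- ===== PRECONDITION & SPEC =====
-- Pre_ excludes negative bit_count (A returns a junk value from one spurious loop iteration,
-- B raises ValueError) and bit_count = 0 with a cursor that is both non-byte-aligned and outside
-- the buffer's bit range (A returns (0, bit_cursor) without touching the buffer, B's byte-span
-- read raises IndexError); everywhere B raises exactly where A raises.
def Pre_unpack_value_py (buffer : List Int) (bit_cursor : Int) (bit_count : Int) : Prop :=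
  (0 ≤ bit_count ∧ -(8 * (buffer.length : Int)) ≤ bit_cursor ∧ bit_cursor + bit_count ≤ 8 * buffer.length)
  ∨ (bit_count = 0 ∧ bit_cursor % 8 = 0)
instance (buffer : List Int) (bit_cursor : Int) (bit_count : Int) : Decidable (Pre_unpack_value_py buffer bit_cursor bit_count) := by unfold Pre_unpack_value_py; infer_instance

def pvWitness_unpack_value_py : List Int × Int × Int := ([173, 92], 3, 7)

def Spec_unpack_value_py (buffer : List Int) (bit_cursor : Int) (bit_count : Int) (out : Int × Int) : Prop := out = unpack_value_py_alt buffer bit_cursor bit_count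
instance (buffer : List Int) (bit_cursor : Int) (bit_count : Int) (out : Int × Int) : Decidable (Spec_unpack_value_py buffer bit_cursor bit_count out) := by unfold Spec_unpack_value_py; infer_instance

-- ===== CLAIM (what is proved, stated in full; the proofs are below) =====
def Claim_equal_unpack_value_py : Prop := ∀ (buffer : List Int) (bit_cursor : Int) (bit_count : Int), Dom_unpack_value_py buffer bit_cursor bit_count → Pre_unpack_value_py buffer bit_cursor bit_count → Spec_unpack_value_py buffer bit_cursor bit_count (unpack_value_py buffer bit_cursor bit_count)
-- ===== LEMMAS AND PROOFS =====

-- low 8 bits of a Python int, as a Nat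
def pvByte (b : Int) : Nat := (b % 256).toNat

-- Nat-level model of B's chunk accumulator
def pvChunk (l : List Int) (a : Nat) : Nat := l.foldl (fun x b => x * 256 + pvByte b) a

-- Nat-level model of the extracted field
def pvVal (buffer : List Int) (c k : Nat) : Nat :=
  pvChunk ((buffer.drop (c / 8)).take ((c + k + 7) / 8 - c / 8)) 0
    / 2 ^ (((c + k + 7) / 8 - c / 8) * 8 - (c % 8 + k)) % 2 ^ k

theorem pvByte_lt (b : Int) : pvByte b < 256 := by unfold pvByte; omega

-- ---- generic bit lemmas ----
theorem pvAndLow (x m n : Nat) (hm : m < 2 ^ n) : x &&& m = x % 2 ^ n &&& m := by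
  apply Nat.eq_of_testBit_eq
  intro i
  simp only [Nat.testBit_and, Nat.testBit_mod_two_pow]
  by_cases hi : i < n
  · simp [hi]
  · have : m.testBit i = false :=
      Nat.testBit_eq_false_of_lt (lt_of_lt_of_le hm (Nat.pow_le_pow_right (by omega) (by omega)))
    simp [this]

theorem pvAddOfAndZero (x : Nat) : ∀ y : Nat, x &&& y = 0 → x + y = x ||| y := by
  induction x using Nat.strongRecOn with
  | _ x ih =>
    intro y h
    by_cases hx : x = 0
    · simp [hx]
    · have hdiv : x / 2 &&& y / 2 = 0 := by
        have := Nat.bitwise_div_two_pow (f := and) (x := x) (y := y) (n := 1) (by simp)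
        simp only [HAnd.hAnd, AndOp.and, Nat.land, pow_one] at h this ⊢
        rw [← this, h]
      have hmod : x % 2 &&& y % 2 = 0 := by
        have := Nat.bitwise_mod_two_pow (f := and) (x := x) (y := y) (n := 1) (by simp)
        simp only [HAnd.hAnd, AndOp.and, Nat.land, pow_one] at h this ⊢
        rw [← this, h]
      have ihx := ih (x / 2) (by omega) (y / 2) hdiv
      have hordiv : (x ||| y) / 2 = x / 2 ||| y / 2 := by
        have h' := Nat.bitwise_div_two_pow (f := or) (x := x) (y := y) (n := 1) (by simp)
        simp only [pow_one] at h'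
        exact h'
      have hormod : (x ||| y) % 2 = x % 2 ||| y % 2 := by
        have h' := Nat.bitwise_mod_two_pow (f := or) (x := x) (y := y) (n := 1) (by simp)
        simp only [pow_one] at h'
        exact h'
      have hmo : x % 2 ||| y % 2 = x % 2 + y % 2 := by
        have hx2 : x % 2 = 0 ∨ x % 2 = 1 := by omega
        have hy2 : y % 2 = 0 ∨ y % 2 = 1 := by omega
        rcases hx2 with h1 | h1 <;> rcases hy2 with h2 | h2 <;> rw [h1, h2] <;>
          first
          | rfl
          | (exfalso; rw [h1, h2] at hmod; simp at hmod)
      omega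

theorem pvXorMask : ∀ n : Nat, ∀ v < 2 ^ n, (2 ^ n - 1) ^^^ v = 2 ^ n - 1 - v := by
  intro n
  induction n with
  | zero => intro v hv; interval_cases v; simp
  | succ n ih =>
    intro v hv
    have e1 : (2:Nat) ^ (n + 1) = 2 * 2 ^ n := by ring
    have hdiv : ((2 ^ (n + 1) - 1) ^^^ v) / 2 = 2 ^ n - 1 - v / 2 := by
      have h := Nat.bitwise_div_two_pow (f := bne) (x := 2 ^ (n + 1) - 1) (y := v) (n := 1) (by simp)
      have h2 : (2 ^ (n + 1) - 1) / 2 = 2 ^ n - 1 := by omega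
      have h3 : v / 2 < 2 ^ n := by omega
      calc ((2 ^ (n + 1) - 1) ^^^ v) / 2 ^ 1 = (2 ^ (n + 1) - 1) / 2 ^ 1 ^^^ v / 2 ^ 1 := h
        _ = 2 ^ n - 1 - v / 2 := by rw [pow_one, h2, ih (v / 2) h3]
    have hmod : ((2 ^ (n + 1) - 1) ^^^ v) % 2 = 1 - v % 2 := by
      have h := Nat.bitwise_mod_two_pow (f := bne) (x := 2 ^ (n + 1) - 1) (y := v) (n := 1) (by simp)
      have h2 : (2 ^ (n + 1) - 1) % 2 = 1 := by omega
      have hv2 : v % 2 = 0 ∨ v % 2 = 1 := by omega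
      calc ((2 ^ (n + 1) - 1) ^^^ v) % 2 ^ 1 = ((2 ^ (n + 1) - 1) % 2 ^ 1) ^^^ v % 2 ^ 1 := h
        _ = 1 - v % 2 := by
            rw [pow_one, h2]
            rcases hv2 with h3 | h3 <;> rw [h3] <;> rfl
    have h1 : (1:Nat) ≤ 2 ^ n := Nat.one_le_two_pow
    omega

theorem pvSubAnd (n m v : Nat) (hm : m < 2 ^ n) (hv : v < 2 ^ n) :
    m - (m &&& v) = (2 ^ n - 1 - v) &&& m := by
  have hx : ((2 ^ n - 1 - v) &&& m) &&& (m &&& v) = 0 := by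
    rw [← pvXorMask n v hv]
    apply Nat.eq_of_testBit_eq
    intro i
    simp only [Nat.testBit_and, Nat.testBit_xor, Nat.testBit_two_pow_sub_one, Nat.zero_testBit]
    by_cases hi : i < n
    · cases hb : v.testBit i <;> cases hc : m.testBit i <;> simp [hi]
    · have h5 : v.testBit i = false :=
        Nat.testBit_eq_false_of_lt (lt_of_lt_of_le hv (Nat.pow_le_pow_right (by omega) (by omega)))
      simp [h5, hi]
  have ho : ((2 ^ n - 1 - v) &&& m) ||| (m &&& v) = m := by
    rw [← pvXorMask n v hv]
    apply Nat.eq_of_testBit_eq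
    intro i
    simp only [Nat.testBit_and, Nat.testBit_or, Nat.testBit_xor, Nat.testBit_two_pow_sub_one]
    by_cases hi : i < n
    · cases hb : v.testBit i <;> cases hc : m.testBit i <;> simp [hi]
    · have : m.testBit i = false :=
        Nat.testBit_eq_false_of_lt (lt_of_lt_of_le hm (Nat.pow_le_pow_right (by omega) (by omega)))
      simp [this]
  have := pvAddOfAndZero ((2 ^ n - 1 - v) &&& m) (m &&& v) hx
  have hle : m &&& v ≤ m := Nat.and_le_left
  omega

-- Python b & m for a small nonnegative mask, on ANY b (also negative): only b's low 8 bits matter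
theorem pvBandLow (b : Int) (m : Nat) (hm : m < 256) :
    PySem.Int.band b (m : Int) = ((pvByte b &&& m : Nat) : Int) := by
  have hm' : (0:Int) ≤ (m : Int) := by positivity
  by_cases hb : 0 ≤ b
  · rw [PySem.Int.band_of_nonneg hb hm']
    have h1 : pvByte b = b.toNat % 256 := by unfold pvByte; omega
    have h2 : (m : Int).toNat = m := by omega
    rw [h1, h2]
    exact congrArg _ (pvAndLow b.toNat m 8 (by norm_num [hm]))
  · have hdef : PySem.Int.band b (m : Int) = (((m : Int).toNat - ((m : Int).toNat &&& (-b - 1).toNat) : Nat) : Int) := by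
      simp only [PySem.Int.band, if_neg hb, if_pos hm']
    have h2 : (m : Int).toNat = m := by omega
    rw [hdef, h2]
    congr 1
    set y := (-b - 1).toNat with hy
    have h1 : pvByte b = 255 - y % 256 := by unfold pvByte; omega
    have h3 : m &&& y = m &&& y % 256 := by
      conv_lhs => rw [Nat.and_comm, pvAndLow y m 8 (by norm_num [hm]), Nat.and_comm]
      norm_num
    rw [h1, h3]
    have h4 := pvSubAnd 8 m (y % 256) (by norm_num [hm]) (by omega)
    norm_num at h4
    exact h4

-- mask algebra for the tail-byte case
theorem pvMaskShift (t k : Nat) (hk : k ≤ 8) :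
    (2 ^ (t + k) - 1) &&& (255 <<< t) = (2 ^ k - 1) <<< t := by
  apply Nat.eq_of_testBit_eq
  intro i
  have h255 : (255 : Nat) = 2 ^ 8 - 1 := by norm_num
  rw [h255]
  simp only [Nat.testBit_and, Nat.testBit_shiftLeft, Nat.testBit_two_pow_sub_one]
  by_cases h1 : t ≤ i <;> by_cases h2 : i < t + k <;>
    simp [h1, h2] <;> omega

theorem pvAndShift (x y t : Nat) : x &&& (y <<< t) = ((x >>> t) &&& y) <<< t := by
  apply Nat.eq_of_testBit_eq
  intro i
  simp only [Nat.testBit_and, Nat.testBit_shiftLeft, Nat.testBit_shiftRight]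
  by_cases h : t ≤ i
  · have he : t + (i - t) = i := by omega
    simp [h, he]
  · simp [h]

-- mod/div split for one consumed byte
theorem pvStep (byte rest t k' u : Nat) (hrest : rest < 2 ^ (t + k')) :
    (byte * 2 ^ (t + k') + rest) / 2 ^ t % 2 ^ (u + k') =
      byte % 2 ^ u * 2 ^ k' + rest / 2 ^ t % 2 ^ k' := by
  have hposT : 0 < (2:Nat) ^ t := Nat.two_pow_pos t
  have hposK : 0 < (2:Nat) ^ k' := Nat.two_pow_pos k'
  have hposU : 0 < (2:Nat) ^ u := Nat.two_pow_pos u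
  have hq : rest / 2 ^ t < 2 ^ k' := by
    rw [Nat.div_lt_iff_lt_mul hposT]
    calc rest < 2 ^ (t + k') := hrest
      _ = 2 ^ k' * 2 ^ t := by rw [pow_add]; ring
  have hdiv : (byte * 2 ^ (t + k') + rest) / 2 ^ t = byte * 2 ^ k' + rest / 2 ^ t := by
    have h1 : byte * 2 ^ (t + k') + rest = rest + 2 ^ t * (byte * 2 ^ k') := by
      rw [pow_add]; ring
    rw [h1, Nat.add_mul_div_left _ _ hposT, Nat.add_comm]
  rw [hdiv]
  have h2 : (2:Nat) ^ (u + k') = 2 ^ u * 2 ^ k' := pow_add 2 u k'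
  have h3 : byte * 2 ^ k' % (2 ^ u * 2 ^ k') = byte % 2 ^ u * 2 ^ k' :=
    Nat.mul_mod_mul_right (2 ^ k') byte (2 ^ u)
  have hbm : byte % 2 ^ u < 2 ^ u := Nat.mod_lt byte hposU
  have hsum : byte % 2 ^ u * 2 ^ k' + rest / 2 ^ t < 2 ^ u * 2 ^ k' := by
    have : (byte % 2 ^ u + 1) * 2 ^ k' ≤ 2 ^ u * 2 ^ k' :=
      Nat.mul_le_mul_right _ (by omega)
    calc byte % 2 ^ u * 2 ^ k' + rest / 2 ^ t
        < byte % 2 ^ u * 2 ^ k' + 2 ^ k' := by omega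
      _ = (byte % 2 ^ u + 1) * 2 ^ k' := by ring
      _ ≤ 2 ^ u * 2 ^ k' := this
  rw [Nat.mod_eq_of_lt hq]
  have harg : byte * 2 ^ k' + rest / 2 ^ t
      = (byte % 2 ^ u * 2 ^ k' + rest / 2 ^ t) + byte / 2 ^ u * (2 ^ u * 2 ^ k') := by
    conv_lhs => rw [show byte = 2 ^ u * (byte / 2 ^ u) + byte % 2 ^ u from (Nat.div_add_mod byte (2 ^ u)).symm]
    ring
  rw [h2, harg, Nat.add_mul_mod_self_right, Nat.mod_eq_of_lt hsum]

-- chunk accumulator algebra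
theorem pvChunk_shift (l : List Int) : ∀ a : Nat, pvChunk l a = a * 256 ^ l.length + pvChunk l 0 := by
  induction l with
  | nil => intro a; simp [pvChunk]
  | cons b l ih =>
    intro a
    show pvChunk l (a * 256 + pvByte b) = a * 256 ^ (l.length + 1) + pvChunk l (0 * 256 + pvByte b)
    rw [ih (a * 256 + pvByte b), ih (0 * 256 + pvByte b)]
    ring

theorem pvChunk_lt (l : List Int) : ∀ a : Nat, pvChunk l a < (a + 1) * 256 ^ l.length := by
  induction l with
  | nil => intro a; simp [pvChunk]
  | cons b l ih =>
    intro a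
    show pvChunk l (a * 256 + pvByte b) < (a + 1) * 256 ^ (l.length + 1)
    have h1 := ih (a * 256 + pvByte b)
    have h2 : pvByte b < 256 := pvByte_lt b
    calc pvChunk l (a * 256 + pvByte b) < (a * 256 + pvByte b + 1) * 256 ^ l.length := h1
      _ ≤ ((a + 1) * 256) * 256 ^ l.length := Nat.mul_le_mul_right _ (by omega)
      _ = (a + 1) * 256 ^ (l.length + 1) := by ring

-- one fold step over Int equals one base-256 digit step of the Nat model
theorem pvBorStep (n : Nat) (b : Int) :
    PySem.Int.bor ((n : Int) <<< (8 : Int)) (PySem.Int.band b 0xFF)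
      = ((n * 256 + pvByte b : Nat) : Int) := by
  have hb : PySem.Int.band b 0xFF = ((pvByte b &&& 255 : Nat) : Int) := by
    have h := pvBandLow b 255 (by omega)
    exact_mod_cast h
  have hb2 : pvByte b &&& 255 = pvByte b := by
    have h8 : (255:Nat) = 2 ^ 8 - 1 := by norm_num
    rw [h8, Nat.and_two_pow_sub_one_eq_mod]
    exact Nat.mod_eq_of_lt (pvByte_lt b)
  have hs : (n:Int) <<< (8:Int) = ((n <<< 8 : Nat) : Int) := by
    exact_mod_cast (Int.shiftLeft_natCast n 8).symm
  rw [hb, hb2, hs, PySem.Int.bor_natCast]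
  congr 1
  rw [← Nat.shiftLeft_add_eq_or_of_lt (by simpa using pvByte_lt b)]
  rw [Nat.shiftLeft_eq]

-- B's index-fold over a byte range equals the Nat chunk of the corresponding sublist
theorem pvChunkRange (buffer : List Int) : ∀ n s : Nat, ∀ a : Nat, s + n ≤ buffer.length →
    (PySem.List.pyRange (s : Int) ((s + n : Nat) : Int) 1).foldl
      (fun acc i => PySem.Int.bor (acc <<< 8) (PySem.Int.band (PySem.List.pyGetD buffer i 0) 0xFF))
      ((a : Nat) : Int)
      = ((pvChunk ((buffer.drop s).take n) a : Nat) : Int) := by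
  intro n
  induction n with
  | zero =>
    intro s a _
    rw [show ((s + 0 : Nat) : Int) = (s : Int) from by omega,
      PySem.List.pyRange_one_eq_nil le_rfl]
    simp [pvChunk]
  | succ n ih =>
    intro s a hlen
    have hsL : s < buffer.length := by omega
    rw [PySem.List.pyRange_one_cons (by omega : (s:Int) < ((s + (n+1) : Nat) : Int))]
    rw [List.foldl_cons]
    have hget : PySem.List.pyGetD buffer (s : Int) 0 = buffer[s] := by
      rw [PySem.List.pyGetD_eq_getElem buffer 0 (by omega) (by omega)]
      simp
    rw [hget, pvBorStep a buffer[s]]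
    rw [show (s : Int) + 1 = ((s + 1 : Nat) : Int) from by omega,
      show ((s + (n+1) : Nat) : Int) = (((s + 1) + n : Nat) : Int) from by omega]
    rw [ih (s + 1) (a * 256 + pvByte buffer[s]) (by omega)]
    congr 1
    rw [List.drop_eq_getElem_cons hsL, List.take_succ_cons]
    rfl

-- Python b & ((1 << n) - 1) keeps the low n bits of the low byte
theorem pvBandMask (b : Int) (n : Nat) (h : n ≤ 8) :
    PySem.Int.band b ((2 ^ n - 1 : Nat) : Int) = ((pvByte b % 2 ^ n : Nat) : Int) := by
  have hlt : (2 ^ n - 1 : Nat) < 256 := by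
    have : (2:Nat) ^ n ≤ 2 ^ 8 := Nat.pow_le_pow_right (by omega) h
    norm_num at this ⊢
    omega
  rw [pvBandLow b _ hlt, Nat.and_two_pow_sub_one_eq_mod]

-- B evaluated on a nonnegative cursor/count pair
theorem pvAltEval (buffer : List Int) (c k : Nat) (he : (c + k + 7) / 8 ≤ buffer.length) :
    unpack_value_py_alt buffer (c : Int) (k : Int)
      = (((pvVal buffer c k : Nat) : Int), ((c + k : Nat) : Int)) := by
  have hstart : PySem.Int.floordiv (c:Int) 8 = ((c / 8 : Nat) : Int) := by
    rw [PySem.Int.floordiv_eq_ediv_of_pos (by omega : (0:Int) < 8)]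
    omega
  have hstop : PySem.Int.floordiv ((c:Int) + (k:Int) + 7) 8 = (((c + k + 7) / 8 : Nat) : Int) := by
    rw [PySem.Int.floordiv_eq_ediv_of_pos (by omega : (0:Int) < 8)]
    omega
  have hmod : PySem.Int.mod (c:Int) 8 = ((c % 8 : Nat) : Int) := by
    rw [PySem.Int.mod_eq_emod_of_pos (by omega : (0:Int) < 8)]
    omega
  simp only [unpack_value_py_alt, hstart, hstop, hmod]
  rw [show (((c + k + 7) / 8 : Nat) : Int) = ((c / 8 + ((c + k + 7) / 8 - c / 8) : Nat) : Int) from by omega]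
  have hch := pvChunkRange buffer ((c + k + 7) / 8 - c / 8) (c / 8) 0 (by omega)
  rw [Nat.cast_zero] at hch
  rw [hch]
  have htn : (((c / 8 + ((c + k + 7) / 8 - c / 8) : Nat) : Int) - ((c / 8 : Nat) : Int)) * 8
      - (((c % 8 : Nat) : Int) + (k : Int))
      = ((((c + k + 7) / 8 - c / 8) * 8 - (c % 8 + k) : Nat) : Int) := by omega
  rw [htn, Int.toNat_natCast]
  simp only [Int.toNat_natCast]
  have hmask : ((1 <<< k : Nat) : Int) - 1 = ((2 ^ k - 1 : Nat) : Int) := by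
    rw [Nat.shiftLeft_eq, one_mul]
    have h1 := Nat.one_le_two_pow (n := k)
    omega
  rw [hmask]
  rw [← Int.natCast_shiftRight, PySem.Int.band_natCast]
  rw [Nat.shiftRight_eq_div_pow, Nat.and_two_pow_sub_one_eq_mod]
  have hsum : (c : Int) + (k : Int) = ((c + k : Nat) : Int) := by push_cast; ring
  rw [hsum]
  rfl

-- the loop returns immediately on count 0
theorem pvLoopZero (buffer : List Int) (v c : Int) : unpackLoopA buffer v c 0 = (v, c) := by
  rw [unpackLoopA]
  simp

-- single-byte chunk
theorem pvChunkSingle (buffer : List Int) (s : Nat) (hs : s < buffer.length) :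
    pvChunk ((buffer.drop s).take 1) 0 = pvByte (buffer.getD s 0) := by
  rw [List.getD_eq_getElem buffer 0 hs, List.drop_eq_getElem_cons hs,
    show (1:Nat) = 0 + 1 from rfl, List.take_succ_cons, List.take_zero]
  have h : pvChunk [buffer[s]] 0 = 0 * 256 + pvByte buffer[s] := rfl
  rw [h]
  omega

-- field decomposition after consuming the first (partial) byte, aligned case
theorem pvValSplit (buffer : List Int) (c k : Nat) (hk : 8 - c % 8 < k)
    (hlen : c + k ≤ 8 * buffer.length) :
    pvVal buffer c k = pvByte (buffer.getD (c / 8) 0) % 2 ^ (8 - c % 8) * 2 ^ (k - (8 - c % 8))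
      + pvVal buffer (c + (8 - c % 8)) (k - (8 - c % 8)) := by
  have hsL : c / 8 < buffer.length := by omega
  have heL : (c + k + 7) / 8 ≤ buffer.length := by omega
  have hgd : buffer.getD (c / 8) 0 = buffer[c / 8] :=
    List.getD_eq_getElem buffer 0 hsL
  have htake : (buffer.drop (c / 8)).take ((c + k + 7) / 8 - c / 8)
      = buffer[c / 8] :: (buffer.drop (c / 8 + 1)).take ((c + k + 7) / 8 - c / 8 - 1) := by
    rw [List.drop_eq_getElem_cons hsL]
    conv_lhs => rw [show (c + k + 7) / 8 - c / 8 = ((c + k + 7) / 8 - c / 8 - 1) + 1 from by omega]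
    rw [List.take_succ_cons]
  have hlen' : ((buffer.drop (c / 8 + 1)).take ((c + k + 7) / 8 - c / 8 - 1)).length
      = (c + k + 7) / 8 - c / 8 - 1 := by
    rw [List.length_take, List.length_drop]
    omega
  have hchunk : pvChunk ((buffer.drop (c / 8)).take ((c + k + 7) / 8 - c / 8)) 0
      = pvByte buffer[c / 8] * 256 ^ ((c + k + 7) / 8 - c / 8 - 1)
        + pvChunk ((buffer.drop (c / 8 + 1)).take ((c + k + 7) / 8 - c / 8 - 1)) 0 := by
    rw [htake]
    show pvChunk _ (0 * 256 + pvByte buffer[c / 8]) = _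
    rw [pvChunk_shift _ (0 * 256 + pvByte buffer[c / 8]), hlen']
    norm_num
  have hRlt : pvChunk ((buffer.drop (c / 8 + 1)).take ((c + k + 7) / 8 - c / 8 - 1)) 0
      < 256 ^ ((c + k + 7) / 8 - c / 8 - 1) := by
    have h := pvChunk_lt ((buffer.drop (c / 8 + 1)).take ((c + k + 7) / 8 - c / 8 - 1)) 0
    rw [hlen'] at h
    simpa using h
  have h256 : (256:Nat) ^ ((c + k + 7) / 8 - c / 8 - 1)
      = 2 ^ ((((c + k + 7) / 8 - c / 8) * 8 - (c % 8 + k)) + (k - (8 - c % 8))) := by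
    rw [show (256:Nat) = 2 ^ 8 from by norm_num, ← pow_mul]
    congr 1
    omega
  unfold pvVal
  rw [hgd, hchunk, h256]
  rw [show (c + (8 - c % 8) + (k - (8 - c % 8)) + 7) / 8 = (c + k + 7) / 8 from by omega]
  rw [show (c + (8 - c % 8)) / 8 = c / 8 + 1 from by omega]
  rw [show (c + (8 - c % 8)) % 8 = 0 from by omega]
  rw [show ((c + k + 7) / 8 - (c / 8 + 1)) * 8 - (0 + (k - (8 - c % 8)))
      = ((c + k + 7) / 8 - c / 8) * 8 - (c % 8 + k) from by omega]
  rw [show (c + k + 7) / 8 - (c / 8 + 1) = (c + k + 7) / 8 - c / 8 - 1 from by omega]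
  have hstep := pvStep (pvByte buffer[c / 8])
    (pvChunk ((buffer.drop (c / 8 + 1)).take ((c + k + 7) / 8 - c / 8 - 1)) 0)
    (((c + k + 7) / 8 - c / 8) * 8 - (c % 8 + k)) (k - (8 - c % 8)) (8 - c % 8)
    (by rw [← h256]; exact hRlt)
  rw [show (8 - c % 8) + (k - (8 - c % 8)) = k from by omega] at hstep
  exact hstep

-- tail case: the field ends inside the current byte
theorem pvValTail (buffer : List Int) (c k : Nat) (hk1 : 1 ≤ k) (hk : k ≤ 8 - c % 8)
    (hlen : c + k ≤ 8 * buffer.length) :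
    pvVal buffer c k = pvByte (buffer.getD (c / 8) 0) / 2 ^ (8 - c % 8 - k) % 2 ^ k := by
  have hsL : c / 8 < buffer.length := by omega
  have he : (c + k + 7) / 8 - c / 8 = 1 := by omega
  unfold pvVal
  rw [he, pvChunkSingle buffer (c / 8) hsL,
    show 1 * 8 - (c % 8 + k) = 8 - c % 8 - k from by omega]

-- the loop computes the Nat model
theorem pvLoopEval (buffer : List Int) : ∀ k : Nat, ∀ c : Nat, ∀ v : Int, 1 ≤ k →
    c + k ≤ 8 * buffer.length →
    unpackLoopA buffer v (c : Int) (k : Int)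
      = (v + ((pvVal buffer c k : Nat) : Int), ((c + k : Nat) : Int)) := by
  intro k
  induction k using Nat.strongRecOn with
  | _ k ih =>
    intro c v hk hlen
    have hmod : PySem.Int.mod (c:Int) 8 = ((c % 8 : Nat) : Int) := by
      rw [PySem.Int.mod_eq_emod_of_pos (by omega : (0:Int) < 8)]
      omega
    have hfd : PySem.Int.floordiv (c:Int) 8 = ((c / 8 : Nat) : Int) := by
      rw [PySem.Int.floordiv_eq_ediv_of_pos (by omega : (0:Int) < 8)]
      omega
    have hbu : (8:Int) - ((c % 8 : Nat) : Int) = ((8 - c % 8 : Nat) : Int) := by omega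
    rw [unpackLoopA, dif_neg (by omega : ¬ ((k:Int) = 0))]
    simp only [hmod, hfd, hbu, PySem.List.pyGetD_natCast, Int.toNat_natCast]
    by_cases hcase : 8 - c % 8 ≤ k
    · have hpos : (0:Int) ≤ (k:Int) - ((8 - c % 8 : Nat) : Int) := by omega
      rw [dif_pos hpos]
      rw [show (1 <<< (8 - c % 8) - 1 : Nat) = 2 ^ (8 - c % 8) - 1 from by
        rw [Nat.shiftLeft_eq, one_mul]]
      rw [pvBandMask _ _ (by omega)]
      rw [show ((k:Int) - ((8 - c % 8 : Nat) : Int)).toNat = k - (8 - c % 8) from by omega]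
      rw [← Int.natCast_shiftLeft, Nat.shiftLeft_eq]
      rw [show (c:Int) + ((8 - c % 8 : Nat) : Int) = ((c + (8 - c % 8) : Nat) : Int) from by omega]
      rw [show (k:Int) - ((8 - c % 8 : Nat) : Int) = ((k - (8 - c % 8) : Nat) : Int) from by omega]
      rcases Nat.lt_or_ge (8 - c % 8) k with hlt | hge
      · rw [ih (k - (8 - c % 8)) (by omega) (c + (8 - c % 8)) _ (by omega) (by omega)]
        rw [pvValSplit buffer c k (by omega) hlen]
        refine Prod.ext ?_ ?_
        · push_cast
          ring
        · show ((c + (8 - c % 8) + (k - (8 - c % 8)) : Nat) : Int) = ((c + k : Nat) : Int)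
          omega
      · rw [show k - (8 - c % 8) = 0 from by omega, Nat.cast_zero, pvLoopZero]
        rw [pvValTail buffer c k hk (by omega) hlen]
        refine Prod.ext ?_ ?_
        · show v + ((pvByte (buffer.getD (c / 8) 0) % 2 ^ (8 - c % 8) * 2 ^ 0 : Nat) : Int)
              = v + ((pvByte (buffer.getD (c / 8) 0) / 2 ^ (8 - c % 8 - k) % 2 ^ k : Nat) : Int)
          rw [show 8 - c % 8 - k = 0 from by omega, pow_zero, Nat.div_one, mul_one,
            show (8 - c % 8) = k from by omega]
        · show ((c + (8 - c % 8) : Nat) : Int) = ((c + k : Nat) : Int)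
          omega
    · have hneg : ¬ (0:Int) ≤ (k:Int) - ((8 - c % 8 : Nat) : Int) := by omega
      rw [dif_neg hneg]
      rw [show (-((k:Int) - ((8 - c % 8 : Nat) : Int))).toNat = 8 - c % 8 - k from by omega]
      rw [show ((1 <<< (8 - c % 8) : Nat) : Int) - 1 = ((2 ^ (8 - c % 8) - 1 : Nat) : Int) from by
        rw [Nat.shiftLeft_eq, one_mul]
        have h1 := Nat.one_le_two_pow (n := 8 - c % 8)
        omega]
      rw [PySem.Int.band_natCast]
      rw [show ((2 ^ (8 - c % 8) - 1 : Nat) &&& (255 <<< (8 - c % 8 - k))) = (2 ^ k - 1) <<< (8 - c % 8 - k) from by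
        have h := pvMaskShift (8 - c % 8 - k) k (by omega)
        rw [show (8 - c % 8 - k) + k = 8 - c % 8 from by omega] at h
        exact h]
      have hMlt : ((2 ^ k - 1) <<< (8 - c % 8 - k) : Nat) < 256 := by
        rw [Nat.shiftLeft_eq]
        have h1 : (2:Nat) ^ k - 1 < 2 ^ k := by
          have := Nat.one_le_two_pow (n := k)
          omega
        calc (2 ^ k - 1) * 2 ^ (8 - c % 8 - k) < 2 ^ k * 2 ^ (8 - c % 8 - k) :=
              (Nat.mul_lt_mul_right (Nat.two_pow_pos _)).mpr h1
          _ = 2 ^ (8 - c % 8) := by rw [← pow_add]; congr 1; omega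
          _ ≤ 2 ^ 8 := Nat.pow_le_pow_right (by omega) (by omega)
          _ = 256 := by norm_num
      rw [pvBandLow _ _ hMlt, ← Int.natCast_shiftRight, pvLoopZero]
      rw [pvValTail buffer c k hk (by omega) hlen]
      refine Prod.ext ?_ ?_
      · show v + (((pvByte (buffer.getD (c / 8) 0) &&& (2 ^ k - 1) <<< (8 - c % 8 - k)) >>> (8 - c % 8 - k) : Nat) : Int)
            = v + ((pvByte (buffer.getD (c / 8) 0) / 2 ^ (8 - c % 8 - k) % 2 ^ k : Nat) : Int)
        congr 1
        rw [pvAndShift, Nat.shiftLeft_eq]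
        rw [show ∀ X : Nat, (X * 2 ^ (8 - c % 8 - k)) >>> (8 - c % 8 - k) = X from fun X => by
          rw [Nat.shiftRight_eq_div_pow, Nat.mul_div_cancel _ (Nat.two_pow_pos _)]]
        rw [Nat.shiftRight_eq_div_pow, Nat.and_two_pow_sub_one_eq_mod]
      · show (c:Int) + (k:Int) = ((c + k : Nat) : Int)
        omega

-- a negative in-range index reads the same byte as the shifted index in the doubled buffer
theorem pvGetShift (buffer : List Int) (i : Int) (h1 : -(buffer.length : Int) ≤ i)
    (h2 : i < buffer.length) :
    PySem.List.pyGetD buffer i 0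
      = PySem.List.pyGetD (buffer ++ buffer) (i + buffer.length) 0 := by
  have hlen : (buffer ++ buffer).length = buffer.length + buffer.length := by
    simp [List.length_append]
  rw [PySem.List.pyGetD_eq_getElem (buffer ++ buffer) 0 (by omega) (by rw [hlen]; omega)]
  by_cases hi : 0 ≤ i
  · rw [PySem.List.pyGetD_eq_getElem buffer 0 hi h2]
    have hge : buffer.length ≤ (i + buffer.length).toNat := by omega
    rw [List.getElem_append_right hge]
    congr 1
    omega
  · have hkpos : 0 < (-i).toNat := by omega
    have hkle : (-i).toNat ≤ buffer.length := by omega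
    have h5 := PySem.List.pyGetD_neg_natCast buffer (-i).toNat 0 hkpos hkle
    rw [show -(((-i).toNat : Nat) : Int) = i from by omega] at h5
    rw [h5]
    have hlt : (i + (buffer.length : Int)).toNat < buffer.length := by omega
    rw [List.getElem_append_left hlt]
    simp [show buffer.length - (-i).toNat = (i + (buffer.length : Int)).toNat from by omega]

-- an integer range shifted by a constant
theorem pvRangeShift (a b d : Int) :
    PySem.List.pyRange (a + d) (b + d) 1 = (PySem.List.pyRange a b 1).map (fun i => i + d) := by
  rw [PySem.List.pyRange_one, PySem.List.pyRange_one, List.map_map]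
  rw [show (b + d - (a + d)) = b - a from by ring]
  apply List.map_congr_left
  intro k _
  simp
  ring

-- B on a negative cursor = B on the doubled buffer with the cursor shifted by 8*len
theorem pvAltShift (buffer : List Int) (c k : Int) (h1 : -(8 * (buffer.length : Int)) ≤ c)
    (_hk : 0 ≤ k) (h2 : c + k ≤ 8 * buffer.length) :
    unpack_value_py_alt buffer c k
      = ((unpack_value_py_alt (buffer ++ buffer) (c + 8 * buffer.length) k).1,
         (unpack_value_py_alt (buffer ++ buffer) (c + 8 * buffer.length) k).2
           - 8 * buffer.length) := by
  have hstart : PySem.Int.floordiv (c + 8 * (buffer.length : Int)) 8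
      = PySem.Int.floordiv c 8 + (buffer.length : Int) := by
    rw [PySem.Int.floordiv_eq_ediv_of_pos (by omega : (0:Int) < 8),
      PySem.Int.floordiv_eq_ediv_of_pos (by omega : (0:Int) < 8)]
    omega
  have hstop : PySem.Int.floordiv (c + 8 * (buffer.length : Int) + k + 7) 8
      = PySem.Int.floordiv (c + k + 7) 8 + (buffer.length : Int) := by
    rw [PySem.Int.floordiv_eq_ediv_of_pos (by omega : (0:Int) < 8),
      PySem.Int.floordiv_eq_ediv_of_pos (by omega : (0:Int) < 8)]
    omega
  have hmod : PySem.Int.mod (c + 8 * (buffer.length : Int)) 8 = PySem.Int.mod c 8 := by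
    rw [PySem.Int.mod_eq_emod_of_pos (by omega : (0:Int) < 8),
      PySem.Int.mod_eq_emod_of_pos (by omega : (0:Int) < 8)]
    omega
  have hF1 : -(buffer.length : Int) ≤ PySem.Int.floordiv c 8 := by
    rw [PySem.Int.floordiv_eq_ediv_of_pos (by omega : (0:Int) < 8)]
    omega
  have hE : PySem.Int.floordiv (c + k + 7) 8 ≤ (buffer.length : Int) := by
    rw [PySem.Int.floordiv_eq_ediv_of_pos (by omega : (0:Int) < 8)]
    omega
  simp only [unpack_value_py_alt, hstart, hstop, hmod]
  have hchunk : (PySem.List.pyRange (PySem.Int.floordiv c 8 + (buffer.length : Int))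
        (PySem.Int.floordiv (c + k + 7) 8 + (buffer.length : Int)) 1).foldl
        (fun acc i => PySem.Int.bor (acc <<< 8)
          (PySem.Int.band (PySem.List.pyGetD (buffer ++ buffer) i 0) 0xFF)) 0
      = (PySem.List.pyRange (PySem.Int.floordiv c 8) (PySem.Int.floordiv (c + k + 7) 8) 1).foldl
        (fun acc i => PySem.Int.bor (acc <<< 8)
          (PySem.Int.band (PySem.List.pyGetD buffer i 0) 0xFF)) 0 := by
    rw [pvRangeShift, List.foldl_map]
    apply PySem.List.foldl_congr_mem
    intro acc x hx
    rw [PySem.List.mem_pyRange_one] at hx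
    rw [← pvGetShift buffer x (by omega) (by omega)]
  rw [hchunk]
  rw [show PySem.Int.floordiv (c + k + 7) 8 + (buffer.length : Int)
      - (PySem.Int.floordiv c 8 + (buffer.length : Int))
      = PySem.Int.floordiv (c + k + 7) 8 - PySem.Int.floordiv c 8 from by ring]
  refine Prod.ext rfl ?_
  show c + k = c + 8 * (buffer.length : Int) + k - 8 * (buffer.length : Int)
  ring

-- A's loop on a negative cursor = A's loop on the doubled buffer with the cursor shifted
theorem pvLoopShift (buffer : List Int) : ∀ k : Nat, ∀ c v : Int,
    -(8 * (buffer.length : Int)) ≤ c → c + k ≤ 8 * buffer.length →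
    unpackLoopA buffer v c k
      = ((unpackLoopA (buffer ++ buffer) v (c + 8 * buffer.length) k).1,
         (unpackLoopA (buffer ++ buffer) v (c + 8 * buffer.length) k).2
           - 8 * buffer.length) := by
  intro k
  induction k using Nat.strongRecOn with
  | _ k ih =>
    intro c v h1 h2
    rcases Nat.eq_zero_or_pos k with h0 | hpos
    · subst h0
      rw [Nat.cast_zero, pvLoopZero, pvLoopZero]
      refine Prod.ext rfl ?_
      show c = c + 8 * (buffer.length : Int) - 8 * (buffer.length : Int)
      ring
    · have hfd : PySem.Int.floordiv (c + 8 * (buffer.length : Int)) 8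
          = PySem.Int.floordiv c 8 + (buffer.length : Int) := by
        rw [PySem.Int.floordiv_eq_ediv_of_pos (by omega : (0:Int) < 8),
          PySem.Int.floordiv_eq_ediv_of_pos (by omega : (0:Int) < 8)]
        omega
      have hmod : PySem.Int.mod (c + 8 * (buffer.length : Int)) 8 = PySem.Int.mod c 8 := by
        rw [PySem.Int.mod_eq_emod_of_pos (by omega : (0:Int) < 8),
          PySem.Int.mod_eq_emod_of_pos (by omega : (0:Int) < 8)]
        omega
      have hm0 := PySem.Int.mod_nonneg c (b := 8) (by omega)
      have hm8 := PySem.Int.mod_lt c (b := 8) (by omega)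
      have hmodc : PySem.Int.mod c 8 = c % 8 :=
        PySem.Int.mod_eq_emod_of_pos (by omega : (0:Int) < 8)
      have hF1 : -(buffer.length : Int) ≤ PySem.Int.floordiv c 8 := by
        rw [PySem.Int.floordiv_eq_ediv_of_pos (by omega : (0:Int) < 8)]
        omega
      have hF2 : PySem.Int.floordiv c 8 < (buffer.length : Int) := by
        rw [PySem.Int.floordiv_eq_ediv_of_pos (by omega : (0:Int) < 8)]
        omega
      conv_lhs => rw [unpackLoopA]
      conv_rhs => rw [unpackLoopA]
      rw [dif_neg (by omega : ¬ ((k:Int) = 0)), dif_neg (by omega : ¬ ((k:Int) = 0))]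
      simp only [hfd, hmod]
      rw [← pvGetShift buffer (PySem.Int.floordiv c 8) hF1 hF2]
      by_cases hs : (0:Int) ≤ (k:Int) - (8 - PySem.Int.mod c 8)
      · rw [dif_pos hs, dif_pos hs]
        have hk' : ((k:Int) - (8 - PySem.Int.mod c 8)).toNat < k := by omega
        rw [show (k:Int) - (8 - PySem.Int.mod c 8)
            = ((((k:Int) - (8 - PySem.Int.mod c 8)).toNat : Nat) : Int) from by omega]
        rw [show c + 8 * (buffer.length : Int) + (8 - PySem.Int.mod c 8)
            = (c + (8 - PySem.Int.mod c 8)) + 8 * (buffer.length : Int) from by ring]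
        exact ih _ hk' (c + (8 - PySem.Int.mod c 8)) _ (by omega) (by omega)
      · rw [dif_neg hs, dif_neg hs, pvLoopZero, pvLoopZero]
        refine Prod.ext rfl ?_
        show c + (k:Int) = c + 8 * (buffer.length : Int) + (k:Int) - 8 * (buffer.length : Int)
        ring

-- the equivalence on nonnegative cursors
theorem pvMainNonneg (buffer : List Int) (c k : Nat) (h : c + k ≤ 8 * buffer.length) :
    unpack_value_py buffer (c : Int) (k : Int) = unpack_value_py_alt buffer (c : Int) (k : Int) := by
  unfold unpack_value_py
  rcases Nat.eq_zero_or_pos k with h0 | hpos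
  · subst h0
    rw [pvAltEval buffer c 0 (by omega), Nat.cast_zero, pvLoopZero]
    unfold pvVal
    rw [pow_zero, Nat.mod_one, Nat.cast_zero]
    refine Prod.ext rfl ?_
    show (c : Int) = ((c + 0 : Nat) : Int)
    omega
  · rw [pvLoopEval buffer k c 0 (by omega) (by omega), pvAltEval buffer c k (by omega)]
    simp

-- ===== VERDICT (by name: the statement is the Claim_ definition above) =====
theorem unpack_value_py_spec : Claim_equal_unpack_value_py := by
  intro buffer bit_cursor bit_count _hdom hpre
  unfold Spec_unpack_value_py
  rcases hpre with ⟨hk, hc1, hc2⟩ | ⟨h0, hal⟩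
  · obtain ⟨k, rfl⟩ : ∃ k : Nat, bit_count = (k : Int) := ⟨bit_count.toNat, by omega⟩
    by_cases hc : 0 ≤ bit_cursor
    · obtain ⟨c, rfl⟩ : ∃ c : Nat, bit_cursor = (c : Int) := ⟨bit_cursor.toNat, by omega⟩
      exact pvMainNonneg buffer c k (by omega)
    · have hL : 0 < buffer.length := by omega
      have hshiftA := pvLoopShift buffer k bit_cursor 0 hc1 hc2
      have hshiftB := pvAltShift buffer bit_cursor k hc1 (by omega) hc2
      have hdb : (buffer ++ buffer).length = 2 * buffer.length := by
        simp [List.length_append]; omega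
      have hmain : unpackLoopA (buffer ++ buffer) 0 (bit_cursor + 8 * buffer.length) (k : Int)
          = unpack_value_py_alt (buffer ++ buffer) (bit_cursor + 8 * buffer.length) (k : Int) := by
        obtain ⟨c', hc'⟩ : ∃ c' : Nat, bit_cursor + 8 * buffer.length = (c' : Int) :=
          ⟨(bit_cursor + 8 * buffer.length).toNat, by omega⟩
        rw [hc']
        exact pvMainNonneg (buffer ++ buffer) c' k (by rw [hdb]; omega)
      unfold unpack_value_py
      rw [hshiftA, hshiftB, hmain]
  · subst h0
    unfold unpack_value_py
    rw [pvLoopZero]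
    have hstop : PySem.Int.floordiv (bit_cursor + 0 + 7) 8 = PySem.Int.floordiv bit_cursor 8 := by
      rw [PySem.Int.floordiv_eq_ediv_of_pos (by omega : (0:Int) < 8),
        PySem.Int.floordiv_eq_ediv_of_pos (by omega : (0:Int) < 8)]
      omega
    have hmod : PySem.Int.mod bit_cursor 8 = 0 := by
      rw [PySem.Int.mod_eq_emod_of_pos (by omega : (0:Int) < 8)]
      omega
    simp only [unpack_value_py_alt, hstop, hmod, PySem.List.pyRange_one_eq_nil le_rfl,
      List.foldl_nil]
    norm_num [PySem.Int.band]
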